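-- pv_equiv track=rewrite | github.com/GabrieleFormiconi/hostflow-web | competitor_service.py | _estimate_guest_capacity
-- ===== SOURCE A (Python) =====
-- def _estimate_guest_capacity(name, categories):
--     name_lower = str(name).lower()
--     categories_text = " ".join(categories).lower() if categories else ""
--
--     if any(word in name_lower for word in ["suite", "family", "villa", "house", "home"]):
--         return 4
--
--     if any(word in name_lower for word in ["hotel", "inn", "resort"]):
--         return 2
--
--     if "apartment" in categories_text or "holiday_home" in categories_text:
--         return 4
--
--     if "guest_house" in categories_text:
--         return 3
--
--     if "hostel" in categories_text:
--         return 2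
--
--     return 2
-- ===== SOURCE B (Python) =====
-- _KEYWORD_RULES = [
--     ("suite", 0, 4), ("family", 0, 4), ("villa", 0, 4), ("house", 0, 4), ("home", 0, 4),
--     ("hotel", 1, 2), ("inn", 1, 2), ("resort", 1, 2),
--     ("apartment", 2, 4), ("holiday_home", 2, 4),
--     ("guest_house", 3, 3),
--     ("hostel", 4, 2),
-- ]
--
--
-- def _estimate_guest_capacity(name, categories):
--     name_lower = str(name).lower()
--     categories_text = " ".join(categories).lower() if categories else ""
--     matches = [(prio, val) for kw, prio, val in _KEYWORD_RULES
--                if kw in (name_lower if prio <= 1 else categories_text)]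
--     return min(matches)[1] if matches else 2
-- ===== Notes on version B (the rewrite author's own statement) =====
-- stated objective: alternative
-- what changed: Instead of A's five short-circuiting any()-guarded if-branches, B flattens all keywords into one (keyword, priority, value) table, exhaustively collects every matching keyword into a list, and returns the value attached to the minimum-priority match (2 when nothing matches), which is correct because every keyword of one of A's branches carries that branch's value and priority.
import Mathlib
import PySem

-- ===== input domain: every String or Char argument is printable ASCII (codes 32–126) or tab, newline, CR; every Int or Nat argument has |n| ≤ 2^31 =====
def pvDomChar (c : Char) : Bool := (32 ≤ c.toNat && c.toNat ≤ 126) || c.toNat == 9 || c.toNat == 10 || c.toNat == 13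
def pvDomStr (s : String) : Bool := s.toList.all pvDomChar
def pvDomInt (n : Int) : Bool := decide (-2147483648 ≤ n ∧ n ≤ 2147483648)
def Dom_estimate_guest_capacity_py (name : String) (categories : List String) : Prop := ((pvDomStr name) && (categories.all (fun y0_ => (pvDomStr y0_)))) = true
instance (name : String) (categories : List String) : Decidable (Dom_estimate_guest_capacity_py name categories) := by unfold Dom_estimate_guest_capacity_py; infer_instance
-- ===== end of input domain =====

-- B replaces A's short-circuit if-chain by an exhaustive flat keyword scan: it collects every
-- matching (priority, value) pair and returns the value of the minimum-priority match (objective: alternative).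

-- ===== PORT A =====
def estimate_guest_capacity_py (name : String) (categories : List String) : Int :=
  let name_lower := PySem.Str.lower name
  let categories_text := if categories ≠ [] then PySem.Str.lower (PySem.Str.join " " categories) else ""
  if ["suite", "family", "villa", "house", "home"].any (fun w => PySem.Str.isIn w name_lower) then 4
  else if ["hotel", "inn", "resort"].any (fun w => PySem.Str.isIn w name_lower) then 2
  else if PySem.Str.isIn "apartment" categories_text || PySem.Str.isIn "holiday_home" categories_text then 4
  else if PySem.Str.isIn "guest_house" categories_text then 3
  else if PySem.Str.isIn "hostel" categories_text then 2
  else 2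

-- ===== PORT B =====
-- the module-level _KEYWORD_RULES table of (keyword, priority, value)
def egcKeywordRules : List (String × Int × Int) :=
  [("suite", 0, 4), ("family", 0, 4), ("villa", 0, 4), ("house", 0, 4), ("home", 0, 4),
   ("hotel", 1, 2), ("inn", 1, 2), ("resort", 1, 2),
   ("apartment", 2, 4), ("holiday_home", 2, 4),
   ("guest_house", 3, 3),
   ("hostel", 4, 2)]

-- one comparison step of Python's min: keep the accumulator unless the next pair is lexicographically smaller
def egcF (a b : Int × Int) : Int × Int :=
  if b.1 < a.1 ∨ (b.1 = a.1 ∧ b.2 < a.2) then b else a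

-- Python's min over a list of int pairs (lexicographic, first minimum wins); none on []
def egcMinPair? : List (Int × Int) → Option (Int × Int)
  | [] => none
  | x :: xs => some (xs.foldl egcF x)

def estimate_guest_capacity_py_alt (name : String) (categories : List String) : Int :=
  let name_lower := PySem.Str.lower name
  let categories_text := if categories ≠ [] then PySem.Str.lower (PySem.Str.join " " categories) else ""
  let matchList := (egcKeywordRules.filter
      (fun r => PySem.Str.isIn r.1 (if r.2.1 ≤ 1 then name_lower else categories_text))).map
      (fun r => r.2)
  match egcMinPair? matchList with
  | some m => m.2
  | none => 2

-- ===== PRECONDITION & SPEC =====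
def Spec_estimate_guest_capacity_py (name : String) (categories : List String) (out : Int) : Prop := out = estimate_guest_capacity_py_alt name categories
instance (name : String) (categories : List String) (out : Int) : Decidable (Spec_estimate_guest_capacity_py name categories out) := by unfold Spec_estimate_guest_capacity_py; infer_instance

-- ===== CLAIM (what is proved, stated in full; the proofs are below) =====
def Claim_equal_estimate_guest_capacity_py : Prop := ∀ (name : String) (categories : List String), Dom_estimate_guest_capacity_py name categories → Spec_estimate_guest_capacity_py name categories (estimate_guest_capacity_py name categories)

-- ===== LEMMAS AND PROOFS =====

def egcLt (y x : Int × Int) : Prop := y.1 < x.1 ∨ (y.1 = x.1 ∧ y.2 < x.2)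

def egcMatches (n c : String) : List (Int × Int) :=
  (egcKeywordRules.filter
      (fun r => PySem.Str.isIn r.1 (if r.2.1 ≤ 1 then n else c))).map (fun r => r.2)

-- the fold of egcF returns an element of a :: l and no element of a :: l is lexicographically below it
theorem egc_foldl_min (l : List (Int × Int)) : ∀ a : Int × Int,
    (l.foldl egcF a = a ∨ l.foldl egcF a ∈ l) ∧
    ¬ egcLt a (l.foldl egcF a) ∧ ∀ y ∈ l, ¬ egcLt y (l.foldl egcF a) := by
  induction l with
  | nil =>
      intro a
      refine ⟨Or.inl rfl, ?_, by simp⟩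
      simp only [List.foldl_nil]
      unfold egcLt; omega
  | cons b t ih =>
      intro a
      obtain ⟨hmem, hacc, hall⟩ := ih (egcF a b)
      by_cases hc : b.1 < a.1 ∨ (b.1 = a.1 ∧ b.2 < a.2)
      · have hfb : egcF a b = b := by unfold egcF; rw [if_pos hc]
        rw [hfb] at hmem hacc hall
        simp only [List.foldl_cons, hfb]
        refine ⟨?_, ?_, ?_⟩
        · rcases hmem with h | h
          · exact Or.inr (by rw [h]; exact List.mem_cons_self ..)
          · exact Or.inr (List.mem_cons_of_mem _ h)
        · intro h
          exact hacc (by unfold egcLt at h ⊢; omega)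
        · intro y hy
          rcases List.mem_cons.mp hy with rfl | hyt
          · exact hacc
          · exact hall y hyt
      · have hfb : egcF a b = a := by unfold egcF; rw [if_neg hc]
        rw [hfb] at hmem hacc hall
        simp only [List.foldl_cons, hfb]
        refine ⟨?_, ?_, ?_⟩
        · rcases hmem with h | h
          · exact Or.inl h
          · exact Or.inr (List.mem_cons_of_mem _ h)
        · exact hacc
        · intro y hy
          rcases List.mem_cons.mp hy with rfl | hyt
          · intro h
            exact hacc (by unfold egcLt at h ⊢; omega)
          · exact hall y hyt

-- Python's min returns the value of x whenever x is in the list, nothing is below x,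
-- and every pair with x's priority carries x's value
theorem egc_min_val (m : List (Int × Int)) (x : Int × Int) (hx : x ∈ m)
    (hmin : ∀ y ∈ m, ¬ egcLt y x) (hval : ∀ y ∈ m, y.1 = x.1 → y.2 = x.2) :
    (match egcMinPair? m with | some z => z.2 | none => (2 : Int)) = x.2 := by
  match m, hx with
  | a :: t, hx =>
    obtain ⟨hmem, hacc, hall⟩ := egc_foldl_min t a
    have hrm : t.foldl egcF a ∈ a :: t := by
      rcases hmem with h | h
      · rw [h]; exact List.mem_cons_self ..
      · exact List.mem_cons_of_mem _ h
    have h1 : ¬ egcLt (t.foldl egcF a) x := hmin _ hrm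
    have h2 : ¬ egcLt x (t.foldl egcF a) := by
      rcases List.mem_cons.mp hx with rfl | hxt
      · exact hacc
      · exact hall x hxt
    have heq : (t.foldl egcF a).1 = x.1 := by unfold egcLt at h1 h2; omega
    simpa [egcMinPair?] using hval _ hrm heq

-- membership in the match list implies the corresponding keyword test succeeded
theorem matches_inv (n c : String) (y : Int × Int) (h : y ∈ egcMatches n c) :
    (y = (0, 4) ∧ (PySem.Str.isIn "suite" n = true ∨ PySem.Str.isIn "family" n = true ∨
        PySem.Str.isIn "villa" n = true ∨ PySem.Str.isIn "house" n = true ∨ PySem.Str.isIn "home" n = true))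
  ∨ (y = (1, 2) ∧ (PySem.Str.isIn "hotel" n = true ∨ PySem.Str.isIn "inn" n = true ∨
        PySem.Str.isIn "resort" n = true))
  ∨ (y = (2, 4) ∧ (PySem.Str.isIn "apartment" c = true ∨ PySem.Str.isIn "holiday_home" c = true))
  ∨ (y = (3, 3) ∧ PySem.Str.isIn "guest_house" c = true)
  ∨ (y = (4, 2) ∧ PySem.Str.isIn "hostel" c = true) := by
  obtain ⟨r, hr, rfl⟩ := List.mem_map.mp h
  obtain ⟨hrm, hp⟩ := List.mem_filter.mp hr
  simp only [egcKeywordRules, List.mem_cons, List.not_mem_nil, or_false] at hrm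
  rcases hrm with rfl | rfl | rfl | rfl | rfl | rfl | rfl | rfl | rfl | rfl | rfl | rfl <;>
    simp_all

theorem mem_matches_of (n c : String) (kw : String) (pv : Int × Int)
    (hr : (kw, pv) ∈ egcKeywordRules)
    (h : PySem.Str.isIn kw (if pv.1 ≤ 1 then n else c) = true) : pv ∈ egcMatches n c :=
  List.mem_map.mpr ⟨(kw, pv), List.mem_filter.mpr ⟨hr, h⟩, rfl⟩

theorem egc_core (n c : String) :
    (if ["suite", "family", "villa", "house", "home"].any (fun w => PySem.Str.isIn w n) then (4 : Int)
     else if ["hotel", "inn", "resort"].any (fun w => PySem.Str.isIn w n) then 2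
     else if PySem.Str.isIn "apartment" c || PySem.Str.isIn "holiday_home" c then 4
     else if PySem.Str.isIn "guest_house" c then 3
     else if PySem.Str.isIn "hostel" c then 2
     else 2) =
    (match egcMinPair? (egcMatches n c) with | some m => m.2 | none => 2) := by
  by_cases h1 : (["suite", "family", "villa", "house", "home"].any (fun w => PySem.Str.isIn w n)) = true
  · rw [if_pos h1]
    simp only [List.any_cons, List.any_nil, Bool.or_false, Bool.or_eq_true] at h1
    refine (egc_min_val (egcMatches n c) (0, 4) ?_ ?_ ?_).symm
    · rcases h1 with h | h | h | h | h
      exacts [mem_matches_of n c "suite" (0, 4) (by simp [egcKeywordRules]) (by simpa using h),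
        mem_matches_of n c "family" (0, 4) (by simp [egcKeywordRules]) (by simpa using h),
        mem_matches_of n c "villa" (0, 4) (by simp [egcKeywordRules]) (by simpa using h),
        mem_matches_of n c "house" (0, 4) (by simp [egcKeywordRules]) (by simpa using h),
        mem_matches_of n c "home" (0, 4) (by simp [egcKeywordRules]) (by simpa using h)]
    · intro y hy
      rcases matches_inv n c y hy with ⟨rfl, -⟩ | ⟨rfl, -⟩ | ⟨rfl, -⟩ | ⟨rfl, -⟩ | ⟨rfl, -⟩ <;>
        simp [egcLt]
    · intro y hy hy1
      rcases matches_inv n c y hy with ⟨rfl, -⟩ | ⟨rfl, -⟩ | ⟨rfl, -⟩ | ⟨rfl, -⟩ | ⟨rfl, -⟩ <;>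
        simp_all
  · rw [if_neg h1]
    simp only [List.any_cons, List.any_nil, Bool.or_false, Bool.or_eq_true, not_or] at h1
    by_cases h2 : (["hotel", "inn", "resort"].any (fun w => PySem.Str.isIn w n)) = true
    · rw [if_pos h2]
      simp only [List.any_cons, List.any_nil, Bool.or_false, Bool.or_eq_true] at h2
      refine (egc_min_val (egcMatches n c) (1, 2) ?_ ?_ ?_).symm
      · rcases h2 with h | h | h
        exacts [mem_matches_of n c "hotel" (1, 2) (by simp [egcKeywordRules]) (by simpa using h),
          mem_matches_of n c "inn" (1, 2) (by simp [egcKeywordRules]) (by simpa using h),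
          mem_matches_of n c "resort" (1, 2) (by simp [egcKeywordRules]) (by simpa using h)]
      · intro y hy
        rcases matches_inv n c y hy with ⟨rfl, hc⟩ | ⟨rfl, -⟩ | ⟨rfl, -⟩ | ⟨rfl, -⟩ | ⟨rfl, -⟩ <;>
          simp_all [egcLt]
      · intro y hy hy1
        rcases matches_inv n c y hy with ⟨rfl, hc⟩ | ⟨rfl, -⟩ | ⟨rfl, -⟩ | ⟨rfl, -⟩ | ⟨rfl, -⟩ <;>
          simp_all
    · rw [if_neg h2]
      simp only [List.any_cons, List.any_nil, Bool.or_false, Bool.or_eq_true, not_or] at h2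
      by_cases h3 : (PySem.Str.isIn "apartment" c || PySem.Str.isIn "holiday_home" c) = true
      · rw [if_pos h3]
        simp only [Bool.or_eq_true] at h3
        refine (egc_min_val (egcMatches n c) (2, 4) ?_ ?_ ?_).symm
        · rcases h3 with h | h
          exacts [mem_matches_of n c "apartment" (2, 4) (by simp [egcKeywordRules]) (by simpa using h),
            mem_matches_of n c "holiday_home" (2, 4) (by simp [egcKeywordRules]) (by simpa using h)]
        · intro y hy
          rcases matches_inv n c y hy with ⟨rfl, hc⟩ | ⟨rfl, hc⟩ | ⟨rfl, -⟩ | ⟨rfl, -⟩ | ⟨rfl, -⟩ <;>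
            simp_all [egcLt]
        · intro y hy hy1
          rcases matches_inv n c y hy with ⟨rfl, hc⟩ | ⟨rfl, hc⟩ | ⟨rfl, -⟩ | ⟨rfl, -⟩ | ⟨rfl, -⟩ <;>
            simp_all
      · rw [if_neg h3]
        simp only [Bool.or_eq_true, not_or] at h3
        by_cases h4 : PySem.Str.isIn "guest_house" c = true
        · rw [if_pos h4]
          refine (egc_min_val (egcMatches n c) (3, 3) ?_ ?_ ?_).symm
          · exact mem_matches_of n c "guest_house" (3, 3) (by simp [egcKeywordRules]) (by simpa using h4)
          · intro y hy
            rcases matches_inv n c y hy with ⟨rfl, hc⟩ | ⟨rfl, hc⟩ | ⟨rfl, hc⟩ | ⟨rfl, -⟩ | ⟨rfl, -⟩ <;>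
              simp_all [egcLt]
          · intro y hy hy1
            rcases matches_inv n c y hy with ⟨rfl, hc⟩ | ⟨rfl, hc⟩ | ⟨rfl, hc⟩ | ⟨rfl, -⟩ | ⟨rfl, -⟩ <;>
              simp_all
        · rw [if_neg h4]
          by_cases h5 : PySem.Str.isIn "hostel" c = true
          · rw [if_pos h5]
            refine (egc_min_val (egcMatches n c) (4, 2) ?_ ?_ ?_).symm
            · exact mem_matches_of n c "hostel" (4, 2) (by simp [egcKeywordRules]) (by simpa using h5)
            · intro y hy
              rcases matches_inv n c y hy with ⟨rfl, hc⟩ | ⟨rfl, hc⟩ | ⟨rfl, hc⟩ | ⟨rfl, hc⟩ | ⟨rfl, -⟩ <;>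
                simp_all [egcLt]
            · intro y hy hy1
              rcases matches_inv n c y hy with ⟨rfl, hc⟩ | ⟨rfl, hc⟩ | ⟨rfl, hc⟩ | ⟨rfl, hc⟩ | ⟨rfl, -⟩ <;>
                simp_all
          · rw [if_neg h5]
            have hnil : egcMatches n c = [] := by
              rw [List.eq_nil_iff_forall_not_mem]
              intro y hy
              rcases matches_inv n c y hy with ⟨-, hc⟩ | ⟨-, hc⟩ | ⟨-, hc⟩ | ⟨-, hc⟩ | ⟨-, hc⟩ <;>
                simp_all
            rw [hnil]
            rfl

-- ===== VERDICT (by name: the statement is the Claim_ definition above) =====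
theorem estimate_guest_capacity_py_spec : Claim_equal_estimate_guest_capacity_py := by
  intro name categories _
  unfold Spec_estimate_guest_capacity_py estimate_guest_capacity_py estimate_guest_capacity_py_alt
  have h := egc_core (PySem.Str.lower name)
    (if categories ≠ [] then PySem.Str.lower (PySem.Str.join " " categories) else "")
  simpa [egcMatches] using h
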